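-- pv_equiv track=rewrite | github.com/ve-i-uj/leetcode | pyleetcode/easy/longest_common_prefix.py | longestCommonPrefix
-- ===== SOURCE A (Python) =====
-- import collections
-- from typing import List
--
-- def longestCommonPrefix(strs: List[str]) -> str:  # noqa
--     vocabulary: dict = collections.defaultdict(int)
--     for word in strs:
--         for i in range(len(word)):
--             prefix = word[0:i+1]
--             vocabulary[prefix] += 1
--
--     prefs = sorted(vocabulary.items(), key=lambda p: (p[1], len(p[0])))
--     last_prefix, cntr = prefs[-1]
--     if cntr == 1:
--         return ''
--
--     return last_prefix
-- ===== SOURCE B (Python) =====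
-- import collections
-- from typing import List
--
--
-- def longestCommonPrefix(strs: List[str]) -> str:
--     # Count every prefix of every word in one pass (no sorting), then take the
--     # max-count prefix, ties broken by length then by last insertion order,
--     # with a single linear scan instead of A's O(P log P) sort.
--     prefixes = []
--     for word in strs:
--         p = ''
--         for ch in word:
--             p += ch
--             prefixes.append(p)
--     counts = collections.Counter(prefixes)
--     best = None
--     for pref, cnt in counts.items():
--         if best is None or cnt > best[1] or (cnt == best[1] and len(pref) >= len(best[0])):
--             best = (pref, cnt)
--     if best is None or best[1] == 1:
--         return ''
--     return best[0]
-- ===== Notes on version B (the rewrite author's own statement) =====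
-- stated objective: alternative
-- what changed: B replaces A's sort of the prefix-count table by a single linear argmax scan (max count, tie: longest then last-inserted) and builds the counts with one Counter over an accumulated prefix list instead of per-index slicing; measured ~1.5x but below a timing run's confirmation gate, so no speed claim.
import Mathlib
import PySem

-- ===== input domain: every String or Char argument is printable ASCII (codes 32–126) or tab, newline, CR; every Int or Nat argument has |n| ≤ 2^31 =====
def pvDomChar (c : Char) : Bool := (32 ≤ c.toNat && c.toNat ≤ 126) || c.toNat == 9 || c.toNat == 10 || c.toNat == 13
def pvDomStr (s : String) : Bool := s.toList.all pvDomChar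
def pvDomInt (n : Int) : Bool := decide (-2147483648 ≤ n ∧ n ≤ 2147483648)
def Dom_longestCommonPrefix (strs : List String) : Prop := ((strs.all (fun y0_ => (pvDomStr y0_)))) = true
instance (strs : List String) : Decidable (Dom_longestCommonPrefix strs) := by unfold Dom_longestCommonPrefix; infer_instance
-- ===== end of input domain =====

-- B replaces A's sort of the prefix-count table by a single linear argmax scan
-- (and builds the counts with one Counter over an accumulated prefix list).

-- ===== PORT A =====
-- Strings are ported on the List Char side (PySem convention); dict keys are List Char.
def longestCommonPrefix (strs : List String) : String :=
  let vocabulary : PySem.Dict (List Char) Int :=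
    strs.foldl (fun voc word =>
      (PySem.List.pyRange 0 (PySem.Str.len word) 1).foldl (fun voc i =>
        voc.modify (PySem.List.slice word.toList (some 0) (some (i + 1))) 0 (· + 1)) voc)
      PySem.Dict.empty
  let prefs := PySem.List.sorted2 vocabulary.items (fun p => p.2)
    (fun p => ((p.1.length : Int))) false
  -- prefs[-1]; IndexError (prefs = []) is excluded by Pre_
  let lastp := PySem.List.pyGetD prefs (-1) ([], 0)
  if lastp.2 == 1 then "" else String.ofList lastp.1

-- ===== PORT B =====
def longestCommonPrefix_alt (strs : List String) : String :=
  let prefixes : List (List Char) :=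
    strs.foldl (fun acc word =>
      (word.toList.foldl (fun (s : List Char × List (List Char)) ch =>
        (s.1 ++ [ch], s.2 ++ [s.1 ++ [ch]])) ([], acc)).2) []
  let counts : PySem.Dict (List Char) Int := PySem.Dict.counter prefixes
  match counts.items with
  | [] => ""          -- best is None
  | x :: rest =>
    let best := rest.foldl (fun b p =>
      if decide (b.2 < p.2) || (p.2 == b.2 && decide (b.1.length ≤ p.1.length))
      then p else b) x
    if best.2 == 1 then "" else String.ofList best.1

-- ===== PRECONDITION & SPEC =====
-- Pre_ excludes inputs whose strings are all empty (including []): there A's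
-- prefs[-1] raises IndexError (the prefix table is empty).
def Pre_longestCommonPrefix (strs : List String) : Prop :=
  ∃ s ∈ strs, PySem.Str.len s ≠ 0
instance (strs : List String) : Decidable (Pre_longestCommonPrefix strs) := by
  unfold Pre_longestCommonPrefix; infer_instance

def pvWitness_longestCommonPrefix : List String := ["fl", "f"]

def Spec_longestCommonPrefix (strs : List String) (out : String) : Prop :=
  out = longestCommonPrefix_alt strs
instance (strs : List String) (out : String) : Decidable (Spec_longestCommonPrefix strs out) := by
  unfold Spec_longestCommonPrefix; infer_instance

-- ===== CLAIM (what is proved, stated in full; the proofs are below) =====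
def Claim_equal_longestCommonPrefix : Prop := ∀ (strs : List String), Dom_longestCommonPrefix strs → Pre_longestCommonPrefix strs → Spec_longestCommonPrefix strs (longestCommonPrefix strs)

-- ===== LEMMAS AND PROOFS =====

-- Boolean strict lexicographic comparison on a (k1, k2) key — exactly the
-- `before` predicate PySem.List.sorted2 inserts with.
def pvLtB {α : Type} (k1 k2 : α → Int) (a b : α) : Bool :=
  decide (k1 a < k1 b) || (!decide (k1 b < k1 a) && decide (k2 a < k2 b))

lemma pvLtB_iff {α : Type} (k1 k2 : α → Int) (a b : α) :
    pvLtB k1 k2 a b = true ↔ (k1 a < k1 b ∨ (¬ k1 b < k1 a ∧ k2 a < k2 b)) := by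
  simp [pvLtB]

lemma pvLtB_false_iff {α : Type} (k1 k2 : α → Int) (a b : α) :
    pvLtB k1 k2 a b = false ↔ (k1 b < k1 a ∨ (k1 a = k1 b ∧ k2 b ≤ k2 a)) := by
  rw [← Bool.not_eq_true, not_iff_comm, pvLtB_iff]; constructor <;> intro h <;> omega

lemma insertBy_cons {α : Type} (before : α → α → Bool) (x y : α) (ys : List α) :
    PySem.List.insertBy before x (y :: ys)
      = if before x y then x :: y :: ys else y :: PySem.List.insertBy before x ys := rfl

lemma insertBy_ne_nil {α : Type} (before : α → α → Bool) (x : α) (acc : List α) :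
    PySem.List.insertBy before x acc ≠ [] := by
  cases acc with
  | nil => simp [PySem.List.insertBy]
  | cons y ys => by_cases h : before x y <;> simp [PySem.List.insertBy, h]

lemma insertBy_pairwise {α : Type} (k1 k2 : α → Int) (x : α) (acc : List α)
    (h : acc.Pairwise fun a b => pvLtB k1 k2 b a = false) :
    (PySem.List.insertBy (pvLtB k1 k2) x acc).Pairwise
      (fun a b => pvLtB k1 k2 b a = false) := by
  induction acc with
  | nil => simp [PySem.List.insertBy]
  | cons y ys ih =>
    rw [List.pairwise_cons] at h
    obtain ⟨hy, hys⟩ := h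
    by_cases hb : pvLtB k1 k2 x y
    · simp only [PySem.List.insertBy, hb, if_pos]
      rw [List.pairwise_cons]
      refine ⟨?_, List.pairwise_cons.mpr ⟨hy, hys⟩⟩
      intro z hz
      rcases List.mem_cons.mp hz with rfl | hz
      · rw [pvLtB_iff] at hb; rw [pvLtB_false_iff]; omega
      · have := hy z hz
        rw [pvLtB_iff] at hb; rw [pvLtB_false_iff] at this ⊢; omega
    · rw [Bool.not_eq_true] at hb
      simp only [PySem.List.insertBy, hb]
      rw [if_neg (by simp)]
      rw [List.pairwise_cons]
      refine ⟨?_, ih hys⟩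
      intro z hz
      rcases (PySem.List.mem_insertBy _ _ _ _).mp hz with rfl | hz
      · exact hb
      · exact hy z hz

lemma getLast?_insertBy {α : Type} (k1 k2 : α → Int) (x m : α) (acc : List α)
    (h : acc.Pairwise fun a b => pvLtB k1 k2 b a = false)
    (hm : acc.getLast? = some m) :
    (PySem.List.insertBy (pvLtB k1 k2) x acc).getLast?
      = some (if pvLtB k1 k2 x m then m else x) := by
  induction acc generalizing m with
  | nil => simp at hm
  | cons y ys ih =>
    rw [List.pairwise_cons] at h
    obtain ⟨hy, hys⟩ := h
    cases ys with
    | nil =>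
      have hmy : y = m := by simpa using hm
      subst hmy
      by_cases hb : pvLtB k1 k2 x y
      · simp [PySem.List.insertBy, hb]
      · rw [Bool.not_eq_true] at hb
        simp [PySem.List.insertBy, hb]
    | cons z zs =>
      have hm' : (z :: zs).getLast? = some m := by
        rw [← List.getLast?_cons_cons (a := y)]; exact hm
      have hmem : m ∈ z :: zs := List.mem_of_getLast? hm'
      by_cases hb : pvLtB k1 k2 x y
      · have hxm : pvLtB k1 k2 x m = true := by
          have h1 := hy m hmem
          rw [pvLtB_iff] at hb ⊢; rw [pvLtB_false_iff] at h1; omega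
        rw [insertBy_cons, if_pos hb, List.getLast?_cons_cons, List.getLast?_cons_cons, hm', hxm]
        simp
      · rw [Bool.not_eq_true] at hb
        rw [insertBy_cons, hb, if_neg (by simp)]
        have hrec := ih m hys hm'
        rcases hin : PySem.List.insertBy (pvLtB k1 k2) x (z :: zs) with _ | ⟨w, ws⟩
        · exact absurd hin (insertBy_ne_nil _ _ _)
        · rw [hin] at hrec
          rw [List.getLast?_cons_cons]
          exact hrec

-- The last element of the insertion sort is the running "replace on ≥" argmax.
lemma foldl_insertBy_getLast {α : Type} (k1 k2 : α → Int) (xs : List α) :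
    ∀ (acc : List α) (m : α), (acc.Pairwise fun a b => pvLtB k1 k2 b a = false) →
      acc.getLast? = some m →
      (xs.foldl (fun acc x => PySem.List.insertBy (pvLtB k1 k2) x acc) acc).getLast?
        = some (xs.foldl (fun b p => if pvLtB k1 k2 p b then b else p) m) := by
  induction xs with
  | nil => intro acc m _ hm; simpa using hm
  | cons x xs ih =>
    intro acc m hp hm
    simp only [List.foldl_cons]
    exact ih _ _ (insertBy_pairwise k1 k2 x acc hp) (getLast?_insertBy k1 k2 x m acc hp hm)

-- The nonempty prefixes of a word, shortest first.
def pvPrefList (cs : List Char) : List (List Char) :=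
  (List.range cs.length).map (fun i => cs.take (i + 1))

def pvAllP (strs : List String) : List (List Char) :=
  strs.flatMap (fun w => pvPrefList w.toList)

lemma pvA_inner (w : String) (d : PySem.Dict (List Char) Int) :
    (PySem.List.pyRange 0 (PySem.Str.len w) 1).foldl (fun voc i =>
        voc.modify (PySem.List.slice w.toList (some 0) (some (i + 1))) 0 (· + 1)) d
      = (pvPrefList w.toList).foldl (fun voc p => voc.modify p 0 (· + 1)) d := by
  rw [PySem.Str.len_eq, PySem.List.pyRange_one]
  simp only [Int.sub_zero, Int.toNat_natCast, List.foldl_map, pvPrefList]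
  apply PySem.List.foldl_congr_mem
  intro acc i hi
  congr 1
  have : (0 : Int) + (i : Int) + 1 = ((i + 1 : Nat) : Int) := by push_cast; ring
  rw [this]
  have h0 : (0 : Int) = ((0 : Nat) : Int) := rfl
  rw [h0, PySem.List.slice_natCast]
  simp

lemma pvB_inner (cs : List Char) : ∀ (p0 : List Char) (acc : List (List Char)),
    cs.foldl (fun (s : List Char × List (List Char)) ch =>
        (s.1 ++ [ch], s.2 ++ [s.1 ++ [ch]])) (p0, acc)
      = (p0 ++ cs, acc ++ (List.range cs.length).map (fun i => p0 ++ cs.take (i + 1))) := by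
  induction cs with
  | nil => intro p0 acc; simp
  | cons c cs ih =>
    intro p0 acc
    simp only [List.foldl_cons]
    rw [ih]
    simp [List.range_succ_eq_map, List.map_map, Function.comp_def, List.take_succ_cons,
      List.append_assoc]

lemma pvDictA_eq (strs : List String) :
    strs.foldl (fun voc word =>
      (PySem.List.pyRange 0 (PySem.Str.len word) 1).foldl (fun voc i =>
        voc.modify (PySem.List.slice word.toList (some 0) (some (i + 1))) 0 (· + 1)) voc)
      PySem.Dict.empty
    = PySem.Dict.counter (pvAllP strs) := by
  rw [PySem.Dict.counter_eq_foldl, pvAllP]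
  calc strs.foldl (fun voc word =>
        (PySem.List.pyRange 0 (PySem.Str.len word) 1).foldl (fun voc i =>
          voc.modify (PySem.List.slice word.toList (some 0) (some (i + 1))) 0 (· + 1)) voc)
        PySem.Dict.empty
      = strs.foldl (fun voc w =>
          (pvPrefList w.toList).foldl (fun voc p => voc.modify p 0 (· + 1)) voc)
          PySem.Dict.empty :=
        PySem.List.foldl_congr_mem strs _ _ _ (fun d w _ => pvA_inner w d)
    _ = (strs.map (fun w => pvPrefList w.toList)).foldl
          (fun voc l => l.foldl (fun voc p => voc.modify p 0 (· + 1)) voc)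
          PySem.Dict.empty := (List.foldl_map ..).symm
    _ = (strs.flatMap (fun w => pvPrefList w.toList)).foldl
          (fun voc p => voc.modify p 0 (· + 1)) PySem.Dict.empty := by
        rw [List.flatMap_def, List.foldl_flatten]
    _ = (strs.flatMap (fun w => pvPrefList w.toList)).foldl
          (fun d x => d.modify x 0 (fun v => v + 1)) PySem.Dict.empty := rfl

lemma pvPrefixesB_eq (strs : List String) :
    strs.foldl (fun acc word =>
      (word.toList.foldl (fun (s : List Char × List (List Char)) ch =>
        (s.1 ++ [ch], s.2 ++ [s.1 ++ [ch]])) ([], acc)).2) []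
    = pvAllP strs := by
  have h : ∀ (acc : List (List Char)) (w : String),
      (w.toList.foldl (fun (s : List Char × List (List Char)) ch =>
        (s.1 ++ [ch], s.2 ++ [s.1 ++ [ch]])) ([], acc)).2 = acc ++ pvPrefList w.toList := by
    intro acc w
    rw [pvB_inner]
    simp [pvPrefList]
  calc strs.foldl (fun acc word =>
      (word.toList.foldl (fun (s : List Char × List (List Char)) ch =>
        (s.1 ++ [ch], s.2 ++ [s.1 ++ [ch]])) ([], acc)).2) []
      = strs.foldl (fun acc w => acc ++ pvPrefList w.toList) [] :=
        PySem.List.foldl_congr_mem strs _ _ [] (fun acc x _ => h acc x)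
    _ = [] ++ strs.flatMap (fun w => pvPrefList w.toList) :=
        PySem.List.foldl_append_eq_flatMap _ _ _
    _ = pvAllP strs := by simp [pvAllP]

lemma pvAllP_ne_nil (strs : List String) (h : Pre_longestCommonPrefix strs) :
    pvAllP strs ≠ [] := by
  obtain ⟨s, hs, hlen⟩ := h
  rw [PySem.Str.len_eq] at hlen
  have hpos : 0 < s.toList.length := by omega
  have hmem : s.toList.take 1 ∈ pvAllP strs := by
    rw [pvAllP, List.mem_flatMap]
    exact ⟨s, hs, by
      rw [pvPrefList, List.mem_map]
      exact ⟨0, by simpa using hpos, rfl⟩⟩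
  exact List.ne_nil_of_mem hmem

-- B's tuple-≥ replacement test is the negation of the sort's strict-< test.
lemma pvCond_eq (b p : List Char × Int) :
    (decide (b.2 < p.2) || (p.2 == b.2 && decide (b.1.length ≤ p.1.length)))
      = !(pvLtB (fun (q : List Char × Int) => q.2) (fun q => ((q.1.length : Int))) p b) := by
  rw [Bool.eq_iff_iff]
  simp [pvLtB]
  omega

-- ===== VERDICT (by name: the statement is the Claim_ definition above) =====
theorem longestCommonPrefix_spec : Claim_equal_longestCommonPrefix := by
  unfold Claim_equal_longestCommonPrefix
  intro strs _ hpre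
  unfold Spec_longestCommonPrefix
  set k1 : (List Char × Int) → Int := fun p => p.2 with hk1
  set k2 : (List Char × Int) → Int := fun p => ((p.1.length : Int)) with hk2
  -- the items list is nonempty
  have hne : (PySem.Dict.counter (pvAllP strs)).items ≠ [] := by
    rw [PySem.Dict.items_counter]
    obtain ⟨a, ha⟩ := List.exists_mem_of_ne_nil _ (pvAllP_ne_nil strs hpre)
    have hmem : a ∈ PySem.Set.ofList (pvAllP strs) := by
      rw [PySem.Set.mem_ofList]; exact ha
    exact List.ne_nil_of_mem (List.mem_map_of_mem hmem)
  obtain ⟨x, rest, heq⟩ := List.exists_cons_of_ne_nil hne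
  -- A side: the last element of the insertion sort is the running argmax
  set best := rest.foldl (fun b p => if pvLtB k1 k2 p b then b else p) x with hbest
  have hsorted : PySem.List.sorted2 (x :: rest) k1 k2 false
      = (x :: rest).foldl (fun acc y => PySem.List.insertBy (pvLtB k1 k2) y acc) [] := rfl
  have hlast : (PySem.List.sorted2 (x :: rest) k1 k2 false).getLast? = some best := by
    rw [hsorted]
    simp only [List.foldl_cons]
    exact foldl_insertBy_getLast k1 k2 rest [x] x (by simp) (by simp)
  have hsne : PySem.List.sorted2 (x :: rest) k1 k2 false ≠ [] := by
    intro h0; rw [h0] at hlast; simp at hlast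
  have hgl : ∀ (hh : PySem.List.sorted2 (x :: rest) k1 k2 false ≠ []),
      (PySem.List.sorted2 (x :: rest) k1 k2 false).getLast hh = best := by
    intro hh
    have h2 := List.getLast?_eq_some_getLast (l := PySem.List.sorted2 (x :: rest) k1 k2 false) hh
    rw [h2] at hlast
    exact Option.some.inj hlast
  have hA : longestCommonPrefix strs = (if best.2 == 1 then "" else String.ofList best.1) := by
    unfold longestCommonPrefix
    simp only [pvDictA_eq, heq]
    rw [PySem.List.pyGetD_neg_one _ _ hsne, hgl hsne]
  -- B side: its fold function is the same argmax step
  have hfun : rest.foldl (fun b p =>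
      if decide (b.2 < p.2) || (p.2 == b.2 && decide (b.1.length ≤ p.1.length))
      then p else b) x = best := by
    rw [hbest]
    apply PySem.List.foldl_congr_mem
    intro b p _
    rw [pvCond_eq]
    cases pvLtB k1 k2 p b <;> simp
  have hB : longestCommonPrefix_alt strs = (if best.2 == 1 then "" else String.ofList best.1) := by
    unfold longestCommonPrefix_alt
    simp only [pvPrefixesB_eq, heq, hfun]
  rw [hA, hB]
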